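-- pv_equiv track=rewrite | github.com/walkasjesus/LawofMessiah | volume_1_2_scripts/4_convert_dict_to_list.py | merge_preserving_order
-- ===== SOURCE A (Python) =====
-- def merge_preserving_order(old_entry, new_entry):
--     merged = {}
--     # Keep id first, then existing key order, then any newly-added keys.
--     ordered_keys = ["id"]
--     ordered_keys.extend(k for k in old_entry.keys() if k != "id")
--     ordered_keys.extend(k for k in new_entry.keys() if k not in old_entry and k != "id")
--
--     for key in ordered_keys:
--         if key in new_entry:
--             merged[key] = new_entry[key]
--         elif key in old_entry:
--             merged[key] = old_entry[key]
--     return merged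
-- ===== SOURCE B (Python) =====
-- def merge_preserving_order(old_entry, new_entry):
--     combined = {**old_entry, **new_entry}
--     if "id" in combined:
--         id_val = combined.pop("id")
--         return {"id": id_val, **combined}
--     return combined
-- ===== Notes on version B (the rewrite author's own statement) =====
-- stated objective: idiomatic
-- what changed: A builds an explicit ordered key list (id, then old keys, then new-only keys) and refills a dict key by key with per-key membership tests; B merges directly with {**old_entry, **new_entry} (which already gives old-then-new-only order and new-value precedence) and then moves 'id' to the front with a single pop, without mutating either argument.
import Mathlib
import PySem

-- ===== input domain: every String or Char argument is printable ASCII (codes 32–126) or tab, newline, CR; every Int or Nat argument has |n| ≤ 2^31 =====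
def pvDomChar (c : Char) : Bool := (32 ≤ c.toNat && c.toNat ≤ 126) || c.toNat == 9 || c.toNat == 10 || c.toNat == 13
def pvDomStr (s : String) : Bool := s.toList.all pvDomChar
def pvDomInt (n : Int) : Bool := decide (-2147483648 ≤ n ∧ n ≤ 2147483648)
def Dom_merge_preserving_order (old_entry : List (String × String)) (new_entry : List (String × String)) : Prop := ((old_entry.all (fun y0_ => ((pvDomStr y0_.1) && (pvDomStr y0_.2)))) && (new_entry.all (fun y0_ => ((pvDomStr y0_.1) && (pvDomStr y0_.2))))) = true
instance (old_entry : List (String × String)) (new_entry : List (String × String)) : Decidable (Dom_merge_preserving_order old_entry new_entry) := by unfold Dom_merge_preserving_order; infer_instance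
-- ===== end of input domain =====

-- B replaces A's build-ordered-key-list-then-refill loop by a direct dict merge {**old, **new}
-- followed by one id-to-front reordering step (idiomatic; neither argument is mutated).

-- ===== PORT A =====
def merge_preserving_order (old_entry : List (String × String)) (new_entry : List (String × String)) : List (String × String) :=
  let o := PySem.Dict.ofList old_entry
  let n := PySem.Dict.ofList new_entry
  let ordered_keys : List String :=
    ["id"] ++ o.keys.filter (fun k => !(k == "id"))
           ++ n.keys.filter (fun k => !(o.contains k) && !(k == "id"))
  let merged := ordered_keys.foldl (fun m k =>
      if n.contains k then m.insert k (n.getD k "")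
      else if o.contains k then m.insert k (o.getD k "")
      else m) PySem.Dict.empty
  merged.items

-- ===== PORT B =====
def merge_preserving_order_alt (old_entry : List (String × String)) (new_entry : List (String × String)) : List (String × String) :=
  let o := PySem.Dict.ofList old_entry
  let n := PySem.Dict.ofList new_entry
  let combined := o.update n.items           -- combined = {**old_entry, **new_entry}
  match combined.pop? "id" with
  | some (idv, rest) => ((PySem.Dict.empty.insert "id" idv).update rest.items).items   -- {"id": idv, **combined}
  | none => combined.items

-- ===== PRECONDITION & SPEC =====
def Spec_merge_preserving_order (old_entry : List (String × String)) (new_entry : List (String × String)) (out : List (String × String)) : Prop := out = merge_preserving_order_alt old_entry new_entry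
instance (old_entry : List (String × String)) (new_entry : List (String × String)) (out : List (String × String)) : Decidable (Spec_merge_preserving_order old_entry new_entry out) := by unfold Spec_merge_preserving_order; infer_instance

-- ===== CLAIM (what is proved, stated in full; the proofs are below) =====
def Claim_equal_merge_preserving_order : Prop := ∀ (old_entry : List (String × String)) (new_entry : List (String × String)), Dom_merge_preserving_order old_entry new_entry → Spec_merge_preserving_order old_entry new_entry (merge_preserving_order old_entry new_entry)

-- ===== LEMMAS AND PROOFS =====
theorem pv_update_items (ps : List (String × String)) (d : PySem.Dict String String)
    (h : (ps.map Prod.fst).Nodup) :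
    (d.update ps).items =
      d.items.map (fun p => (ps.find? (fun q => q.1 == p.1)).elim p (fun q => (p.1, q.2)))
      ++ ps.filter (fun p => !(d.contains p.1)) := by
  induction ps generalizing d with
  | nil => simp [PySem.Dict.update]
  | cons p ps ih =>
    obtain ⟨hp1, hnd⟩ := List.nodup_cons.mp h
    have hnotin : ∀ x ∈ ps, x.1 ≠ p.1 := by
      intro x hx hxe
      exact hp1 (hxe ▸ List.mem_map_of_mem hx)
    have hfind : ps.find? (fun q => q.1 == p.1) = none := by
      apply List.find?_eq_none.mpr
      intro x hx
      simpa using hnotin x hx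
    have hupd : d.update (p :: ps) = (d.insert p.1 p.2).update ps := rfl
    rw [hupd, ih _ hnd]
    by_cases hc : d.contains p.1 = true
    · rw [PySem.Dict.items_insert_of_contains _ _ hc]
      rw [List.map_map]
      congr 1
      · apply List.map_congr_left
        intro q hq
        by_cases hqe : q.1 = p.1
        · have hb : (q.1 == p.1) = true := beq_iff_eq.mpr hqe
          have hb' : (p.1 == q.1) = true := beq_iff_eq.mpr hqe.symm
          show ((ps.find? (fun r => r.1 == (if (q.1 == p.1) = true then (p.1, p.2) else q).1)).elim
              (if (q.1 == p.1) = true then (p.1, p.2) else q)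
              (fun r => ((if (q.1 == p.1) = true then (p.1, p.2) else q).1, r.2)))
            = ((p :: ps).find? (fun r => r.1 == q.1)).elim q (fun r => (q.1, r.2))
          rw [if_pos hb, List.find?_cons_of_pos (p := fun r : String × String => r.1 == q.1) (a := p) (l := ps) hb']
          show (ps.find? (fun r => r.1 == p.1)).elim (p.1, p.2) (fun r => (p.1, r.2)) = (q.1, p.2)
          rw [hfind, hqe]
          rfl
        · have hb : (q.1 == p.1) = false := beq_eq_false_iff_ne.mpr hqe
          have hb' : (p.1 == q.1) = false := beq_eq_false_iff_ne.mpr (Ne.symm hqe)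
          show ((ps.find? (fun r => r.1 == (if (q.1 == p.1) = true then (p.1, p.2) else q).1)).elim
              (if (q.1 == p.1) = true then (p.1, p.2) else q)
              (fun r => ((if (q.1 == p.1) = true then (p.1, p.2) else q).1, r.2)))
            = ((p :: ps).find? (fun r => r.1 == q.1)).elim q (fun r => (q.1, r.2))
          rw [if_neg (by rw [hb]; exact Bool.false_ne_true),
            List.find?_cons_of_neg (p := fun r : String × String => r.1 == q.1) (a := p) (l := ps) (by rw [show ((fun r : String × String => r.1 == q.1) p) = (p.1 == q.1) from rfl, hb']; exact Bool.false_ne_true)]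
      · rw [List.filter_cons_of_neg (by simp [hc])]
        apply List.filter_congr
        intro x hx
        rw [PySem.Dict.contains_insert]
        rw [beq_eq_false_iff_ne.mpr (hnotin x hx), Bool.false_or]
    · have hc' : d.contains p.1 = false := by simpa using hc
      rw [PySem.Dict.items_insert_of_not_contains _ _ hc']
      rw [List.map_append]
      have hdq : ∀ q ∈ d.items, q.1 ≠ p.1 := by
        intro q hq hqe
        have hcq : d.contains p.1 = true := by
          unfold PySem.Dict.contains
          exact List.any_eq_true.mpr ⟨q, hq, beq_iff_eq.mpr hqe⟩
        rw [hcq] at hc'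
        exact Bool.noConfusion hc'
      rw [List.filter_cons_of_pos (by rw [hc']; rfl)]
      have h1 : d.items.map (fun q => (ps.find? (fun r => r.1 == q.1)).elim q (fun r => (q.1, r.2)))
          = d.items.map (fun q => ((p :: ps).find? (fun r => r.1 == q.1)).elim q (fun r => (q.1, r.2))) := by
        apply List.map_congr_left
        intro q hq
        rw [List.find?_cons_of_neg (p := fun r : String × String => r.1 == q.1) (a := p) (l := ps)
          (by
            rw [show ((fun r : String × String => r.1 == q.1) p) = (p.1 == q.1) from rfl,
              beq_eq_false_iff_ne.mpr (Ne.symm (hdq q hq))]; exact Bool.false_ne_true)]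
      have h2 : [(p.1, p.2)].map (fun q => (ps.find? (fun r => r.1 == q.1)).elim q (fun r => (q.1, r.2))) = [p] := by
        show [(ps.find? (fun r => r.1 == p.1)).elim (p.1, p.2) (fun r => (p.1, r.2))] = [p]
        rw [hfind]
        rfl
      have h3 : ps.filter (fun x => !(d.insert p.1 p.2).contains x.1)
          = ps.filter (fun x => !(d.contains x.1)) := by
        apply List.filter_congr
        intro x hx
        rw [PySem.Dict.contains_insert]
        rw [beq_eq_false_iff_ne.mpr (hnotin x hx), Bool.false_or]
      rw [h1, h2, h3]
      simp

def pvVal (o n : PySem.Dict String String) (k : String) : String :=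
  if n.contains k then n.getD k "" else o.getD k ""

theorem pv_foldA_items (o n : PySem.Dict String String) (ks : List String)
    (d : PySem.Dict String String) (hnd : ks.Nodup)
    (hf : ∀ k ∈ ks, d.contains k = false) :
    (ks.foldl (fun m k =>
      if n.contains k then m.insert k (n.getD k "")
      else if o.contains k then m.insert k (o.getD k "")
      else m) d).items
    = d.items ++ (ks.filter (fun k => n.contains k || o.contains k)).map
        (fun k => (k, pvVal o n k)) := by
  induction ks generalizing d with
  | nil => simp
  | cons k ks ih =>
    obtain ⟨hk1, hnd'⟩ := List.nodup_cons.mp hnd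
    have hdk : d.contains k = false := hf k List.mem_cons_self
    have hne : ∀ x ∈ ks, (x == k) = false := by
      intro x hx
      exact beq_eq_false_iff_ne.mpr (fun hxe => hk1 (hxe ▸ hx))
    rw [List.foldl_cons]
    by_cases hn : n.contains k = true
    · rw [if_pos hn]
      have hf' : ∀ x ∈ ks, (d.insert k (n.getD k "")).contains x = false := by
        intro x hx
        rw [PySem.Dict.contains_insert, hne x hx, Bool.false_or]
        exact hf x (List.mem_cons_of_mem _ hx)
      rw [ih _ hnd' hf', PySem.Dict.items_insert_of_not_contains _ _ hdk]
      rw [List.filter_cons_of_pos (by rw [hn]; rfl)]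
      rw [List.map_cons, List.append_assoc, List.singleton_append]
      rw [show pvVal o n k = n.getD k "" from by unfold pvVal; rw [if_pos hn]]
    · have hn' : n.contains k = false := by simpa using hn
      rw [if_neg hn]
      by_cases ho : o.contains k = true
      · rw [if_pos ho]
        have hf' : ∀ x ∈ ks, (d.insert k (o.getD k "")).contains x = false := by
          intro x hx
          rw [PySem.Dict.contains_insert, hne x hx, Bool.false_or]
          exact hf x (List.mem_cons_of_mem _ hx)
        rw [ih _ hnd' hf', PySem.Dict.items_insert_of_not_contains _ _ hdk]
        rw [List.filter_cons_of_pos (by rw [hn', ho]; rfl)]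
        rw [List.map_cons, List.append_assoc, List.singleton_append]
        rw [show pvVal o n k = o.getD k "" from by unfold pvVal; rw [if_neg (by rw [hn']; exact Bool.false_ne_true)]]
      · have ho' : o.contains k = false := by simpa using ho
        rw [if_neg ho]
        rw [ih _ hnd' (fun x hx => hf x (List.mem_cons_of_mem _ hx))]
        rw [List.filter_cons_of_neg (by rw [hn', ho']; simp)]

theorem pv_find_self (l : List String) (a : String) (h : a ∈ l) :
    l.find? (fun x => x == a) = some a := by
  induction l with
  | nil => cases h
  | cons b l ih =>
    by_cases hb : (b == a) = true
    · rw [List.find?_cons_of_pos (p := fun x => x == a) (a := b) (l := l) hb,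
        beq_iff_eq.mp hb]
    · rw [List.find?_cons_of_neg (p := fun x => x == a) (a := b) (l := l) hb]
      rcases List.mem_cons.mp h with rfl | h'
      · exact absurd (beq_self_eq_true a) hb
      · exact ih h'

theorem pv_f_point (n : PySem.Dict String String) (k v : String) :
    (n.items.find? (fun q => q.1 == k)).elim (k, v) (fun q => (k, q.2))
      = (k, if n.contains k then n.getD k "" else v) := by
  cases hfd : n.items.find? (fun q => q.1 == k) with
  | none =>
    have hc : n.contains k = false := by
      unfold PySem.Dict.contains
      exact List.any_eq_false.mpr (fun x hx => List.find?_eq_none.mp hfd x hx)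
    rw [hc]
    simp only [Bool.false_eq_true, if_false, Option.elim_none]
  | some q =>
    have hq : (q.1 == k) = true := List.find?_some (p := fun q : String × String => q.1 == k) hfd
    have hqm : q ∈ n.items := List.mem_of_find?_eq_some hfd
    have hc : n.contains k = true := by
      unfold PySem.Dict.contains
      exact List.any_eq_true.mpr ⟨q, hqm, hq⟩
    have hget : n.getD k "" = q.2 := by
      unfold PySem.Dict.getD PySem.Dict.get?
      rw [hfd]
      rfl
    rw [hc, hget]
    simp only [if_true, Option.elim_some]

theorem pv_core (o n : PySem.Dict String String) (hko : o.keys.Nodup) (hkn : n.keys.Nodup) :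
    ((["id"] ++ o.keys.filter (fun k => !(k == "id"))
       ++ n.keys.filter (fun k => !(o.contains k) && !(k == "id"))).foldl (fun m k =>
        if n.contains k then m.insert k (n.getD k "")
        else if o.contains k then m.insert k (o.getD k "")
        else m) PySem.Dict.empty).items
    = (match (o.update n.items).pop? "id" with
       | some (idv, rest) => ((PySem.Dict.empty.insert "id" idv).update rest.items).items
       | none => (o.update n.items).items) := by
  -- abbreviations
  have hkn' : (n.items.map Prod.fst).Nodup := hkn
  -- characterize combined = {**old, **new}
  have hC : (o.update n.items).items
      = o.keys.map (fun k => (k, pvVal o n k))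
        ++ (n.keys.filter (fun k => !(o.contains k))).map (fun k => (k, pvVal o n k)) := by
    rw [pv_update_items n.items o hkn']
    congr 1
    · rw [PySem.Dict.items_eq_map_keys o hko "", List.map_map]
      apply List.map_congr_left
      intro k hk
      show (n.items.find? (fun q => q.1 == k)).elim (k, o.getD k "") (fun q => (k, q.2))
        = (k, pvVal o n k)
      rw [pv_f_point]
      rfl
    · rw [PySem.Dict.items_eq_map_keys n hkn "", List.filter_map]
      rw [List.filter_congr (q := fun k => !(o.contains k)) (fun k _ => rfl)]
      apply List.map_congr_left
      intro k hk
      have hkn2 : n.contains k = true :=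
        (PySem.Dict.contains_iff_mem_keys n k).mpr (List.mem_of_mem_filter hk)
      show (k, n.getD k "") = (k, pvVal o n k)
      unfold pvVal
      rw [hkn2]
      rfl
  -- A's ordered key list is duplicate-free
  have hof1 : (o.keys.filter (fun k => !(k == "id"))).Nodup := hko.filter _
  have hnf2 : (n.keys.filter (fun k => !(o.contains k) && !(k == "id"))).Nodup := hkn.filter _
  have hparts : (o.keys.filter (fun k => !(k == "id"))
      ++ n.keys.filter (fun k => !(o.contains k) && !(k == "id"))).Nodup := by
    rw [List.nodup_append]
    refine ⟨hof1, hnf2, ?_⟩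
    intro a ha b hb hab
    have hao : o.contains a = true :=
      (PySem.Dict.contains_iff_mem_keys o a).mpr (List.mem_of_mem_filter ha)
    have hfb := List.of_mem_filter hb
    rw [← hab, hao] at hfb
    simp at hfb
  have hidnot : "id" ∉ (o.keys.filter (fun k => !(k == "id"))
      ++ n.keys.filter (fun k => !(o.contains k) && !(k == "id"))) := by
    intro hmem
    rcases List.mem_append.mp hmem with h' | h'
    · have := List.of_mem_filter h'
      simp at this
    · have := List.of_mem_filter h'
      simp at this
  have hordered : ("id" :: (o.keys.filter (fun k => !(k == "id"))
      ++ n.keys.filter (fun k => !(o.contains k) && !(k == "id")))).Nodup :=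
    List.nodup_cons.mpr ⟨hidnot, hparts⟩
  have hA : ((["id"] ++ o.keys.filter (fun k => !(k == "id"))
       ++ n.keys.filter (fun k => !(o.contains k) && !(k == "id"))).foldl (fun m k =>
        if n.contains k then m.insert k (n.getD k "")
        else if o.contains k then m.insert k (o.getD k "")
        else m) PySem.Dict.empty).items
      = ((("id" :: (o.keys.filter (fun k => !(k == "id"))
          ++ n.keys.filter (fun k => !(o.contains k) && !(k == "id"))))).filter
            (fun k => n.contains k || o.contains k)).map (fun k => (k, pvVal o n k)) := by
    rw [show (["id"] ++ o.keys.filter (fun k => !(k == "id"))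
       ++ n.keys.filter (fun k => !(o.contains k) && !(k == "id")))
      = ("id" :: (o.keys.filter (fun k => !(k == "id"))
          ++ n.keys.filter (fun k => !(o.contains k) && !(k == "id")))) from by
        rw [List.append_assoc]; rfl]
    rw [pv_foldA_items o n _ PySem.Dict.empty hordered
      (fun k _ => PySem.Dict.contains_empty k)]
    rfl
  -- keys taken from o (resp. n) always pass A's membership guard
  have hfo : (o.keys.filter (fun k => !(k == "id"))).filter
      (fun k => n.contains k || o.contains k) = o.keys.filter (fun k => !(k == "id")) := by
    apply List.filter_eq_self.mpr
    intro k hk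
    have : o.contains k = true :=
      (PySem.Dict.contains_iff_mem_keys o k).mpr (List.mem_of_mem_filter hk)
    rw [this, Bool.or_true]
  have hfn : (n.keys.filter (fun k => !(o.contains k) && !(k == "id"))).filter
      (fun k => n.contains k || o.contains k)
      = n.keys.filter (fun k => !(o.contains k) && !(k == "id")) := by
    apply List.filter_eq_self.mpr
    intro k hk
    have : n.contains k = true :=
      (PySem.Dict.contains_iff_mem_keys n k).mpr (List.mem_of_mem_filter hk)
    rw [this, Bool.true_or]
  by_cases hg : (n.contains "id" || o.contains "id") = true
  · -- "id" present in at least one dict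
    have hfindC : ((o.update n.items).items).find? (fun p => p.1 == "id")
        = some ("id", pvVal o n "id") := by
      rw [hC, List.find?_append]
      by_cases hoid : o.contains "id" = true
      · have hm : "id" ∈ o.keys := (PySem.Dict.contains_iff_mem_keys o "id").mp hoid
        rw [List.find?_map,
          show ((fun p : String × String => p.1 == "id") ∘ (fun k => (k, pvVal o n k)))
            = (fun k => k == "id") from rfl,
          pv_find_self o.keys "id" hm]
        rfl
      · have hoid' : o.contains "id" = false := by simpa using hoid
        have hnid : n.contains "id" = true := by
          rcases Bool.or_eq_true_iff.mp hg with h' | h'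
          · exact h'
          · rw [h'] at hoid'; exact absurd hoid' (by simp)
        have hidm : "id" ∈ n.keys.filter (fun k => !(o.contains k)) :=
          List.mem_filter.mpr ⟨(PySem.Dict.contains_iff_mem_keys n "id").mp hnid,
            by rw [hoid']; rfl⟩
        have h1 : (o.keys.map (fun k => (k, pvVal o n k))).find? (fun p => p.1 == "id")
            = none := by
          apply List.find?_eq_none.mpr
          intro x hx
          rcases List.mem_map.mp hx with ⟨k, hk, rfl⟩
          intro hbeq
          have hke : k = "id" := beq_iff_eq.mp hbeq
          exact absurd ((PySem.Dict.contains_iff_mem_keys o k).mpr hk)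
            (by rw [hke, hoid']; simp)
        rw [h1, List.find?_map,
          show ((fun p : String × String => p.1 == "id") ∘ (fun k => (k, pvVal o n k)))
            = (fun k => k == "id") from rfl,
          pv_find_self _ "id" hidm]
        rfl
    have hpop : (o.update n.items).pop? "id"
        = some (pvVal o n "id", (o.update n.items).erase "id") := by
      unfold PySem.Dict.pop? PySem.Dict.get?
      rw [hfindC]
      rfl
    have hrest : ((o.update n.items).erase "id").items
        = (o.keys.filter (fun k => !(k == "id"))).map (fun k => (k, pvVal o n k))
          ++ (n.keys.filter (fun k => !(o.contains k) && !(k == "id"))).map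
              (fun k => (k, pvVal o n k)) := by
      show ((o.update n.items).items.filter (fun p => !(p.1 == "id"))) = _
      rw [hC, List.filter_append, List.filter_map, List.filter_map]
      congr 2
      rw [List.filter_filter]
      apply List.filter_congr
      intro k hk
      show (!(k == "id") && !(o.contains k)) = (!(o.contains k) && !(k == "id"))
      exact Bool.and_comm _ _
    have hrestkeys : (((o.keys.filter (fun k => !(k == "id"))).map (fun k => (k, pvVal o n k))
          ++ (n.keys.filter (fun k => !(o.contains k) && !(k == "id"))).map
              (fun k => (k, pvVal o n k))).map Prod.fst)
        = (o.keys.filter (fun k => !(k == "id")))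
          ++ (n.keys.filter (fun k => !(o.contains k) && !(k == "id"))) := by
      rw [List.map_append, List.map_map, List.map_map]
      congr 1 <;> exact List.map_id _
    have hnodup_rest : ((((o.update n.items).erase "id").items).map Prod.fst).Nodup := by
      rw [hrest, hrestkeys]
      exact hparts
    have hkeysne : ∀ x ∈ ((o.update n.items).erase "id").items, (x.1 == "id") = false := by
      intro x hx
      rw [hrest] at hx
      rcases List.mem_append.mp hx with h' | h' <;> rcases List.mem_map.mp h' with ⟨k, hk, rfl⟩
      · have := List.of_mem_filter hk
        simpa using this
      · have := List.of_mem_filter hk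
        simp only [Bool.and_eq_true] at this
        simpa using this.2
    have hres : ((PySem.Dict.empty.insert "id" (pvVal o n "id")).update
          ((o.update n.items).erase "id").items).items
        = ("id", pvVal o n "id") :: ((o.update n.items).erase "id").items := by
      rw [pv_update_items _ _ hnodup_rest,
        PySem.Dict.items_insert_of_not_contains _ _ (PySem.Dict.contains_empty "id")]
      have hfr : (((o.update n.items).erase "id").items).find?
          (fun q => q.1 == "id") = none :=
        List.find?_eq_none.mpr (fun x hx => by rw [hkeysne x hx]; exact Bool.false_ne_true)
      have hmap : ((PySem.Dict.empty : PySem.Dict String String).items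
            ++ [("id", pvVal o n "id")]).map
          (fun p : String × String =>
            ((((o.update n.items).erase "id").items).find?
              (fun q : String × String => q.1 == p.1)).elim
            p (fun q : String × String => (p.1, q.2)))
          = [("id", pvVal o n "id")] := by
        show [((((o.update n.items).erase "id").items).find? (fun q : String × String => q.1 == "id")).elim
          (("id", pvVal o n "id") : String × String) (fun q : String × String => ("id", q.2))]
          = [("id", pvVal o n "id")]
        rw [hfr]
        rfl
      have hflt : (((o.update n.items).erase "id").items).filter
          (fun p => !((PySem.Dict.empty.insert "id" (pvVal o n "id")).contains p.1))
          = ((o.update n.items).erase "id").items := by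
        apply List.filter_eq_self.mpr
        intro x hx
        rw [PySem.Dict.contains_insert, PySem.Dict.contains_empty, Bool.or_false]
        rw [hkeysne x hx]
        rfl
      rw [hmap, hflt, List.singleton_append]
    rw [hpop]
    show _ = ((PySem.Dict.empty.insert "id" (pvVal o n "id")).update
      ((o.update n.items).erase "id").items).items
    rw [hres, hrest, hA, List.filter_cons_of_pos (p := fun k => n.contains k || o.contains k) hg, List.map_cons,
      List.filter_append, hfo, hfn, List.map_append]
  · have hor : (n.contains "id" || o.contains "id") = false := by simpa using hg
    have hn_id : n.contains "id" = false := (Bool.or_eq_false_iff.mp hor).1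
    have ho_id : o.contains "id" = false := (Bool.or_eq_false_iff.mp hor).2
    have hfindC : ((o.update n.items).items).find? (fun p => p.1 == "id") = none := by
      apply List.find?_eq_none.mpr
      intro x hx
      rw [hC] at hx
      rcases List.mem_append.mp hx with h' | h' <;> rcases List.mem_map.mp h' with ⟨k, hk, rfl⟩
      · intro hbeq
        have hke : k = "id" := beq_iff_eq.mp hbeq
        exact absurd ((PySem.Dict.contains_iff_mem_keys o k).mpr hk)
          (by rw [hke, ho_id]; simp)
      · intro hbeq
        have hkn3 : k ∈ n.keys := List.mem_of_mem_filter hk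
        have hke : k = "id" := beq_iff_eq.mp hbeq
        exact absurd ((PySem.Dict.contains_iff_mem_keys n k).mpr hkn3)
          (by rw [hke, hn_id]; simp)
    have hpop : (o.update n.items).pop? "id" = none := by
      unfold PySem.Dict.pop? PySem.Dict.get?
      rw [hfindC]
      rfl
    rw [hpop, hA, hC]
    rw [List.filter_cons_of_neg (by rw [hor]; exact Bool.false_ne_true)]
    rw [List.filter_append, hfo, hfn, List.map_append]
    congr 1
    · congr 1
      apply List.filter_eq_self.mpr
      intro k hk
      have hke : ¬ k = "id" := fun he =>
        absurd ((PySem.Dict.contains_iff_mem_keys o k).mpr hk) (by rw [he, ho_id]; simp)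
      rw [beq_eq_false_iff_ne.mpr hke]
      rfl
    · congr 1
      apply List.filter_congr
      intro k hk
      have hke : (k == "id") = false := beq_eq_false_iff_ne.mpr (fun he =>
        absurd ((PySem.Dict.contains_iff_mem_keys n k).mpr hk) (by rw [he, hn_id]; simp))
      rw [hke]
      simp

-- ===== VERDICT (by name: the statement is the Claim_ definition above) =====
theorem merge_preserving_order_spec : Claim_equal_merge_preserving_order := by
  intro old_entry new_entry _
  unfold Spec_merge_preserving_order merge_preserving_order merge_preserving_order_alt
  exact pv_core (PySem.Dict.ofList old_entry) (PySem.Dict.ofList new_entry)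
    (PySem.Dict.nodup_keys_ofList old_entry) (PySem.Dict.nodup_keys_ofList new_entry)
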